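-- pv_equiv track=rewrite | github.com/ALLann123/Multi-Agent-Workflows | Supervisor_Agent/decode_encode.py | detect_base
-- ===== SOURCE A (Python) =====
-- def detect_base(value: str) -> str:
--     """
--     Detect whether the given string is hex, binary, or decimal.
--     Returns: 'hex', 'binary', 'decimal', or 'unknown'
--     """
--     value = value.strip().lower()
--     if value.startswith("0x"):
--         return "hex"
--     if value.startswith("0b"):
--         return "binary"
--     if all(c in "01" for c in value):
--         return "binary"
--     if all(c in "0123456789abcdef" for c in value):
--         try:
--             int(value, 10)
--             return "decimal"
--         except ValueError:
--             return "hex"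
--     return "unknown"
-- ===== SOURCE B (Python) =====
-- def _char_class(c: str) -> int:
--     """Rank of a character: 0 = binary digit, 1 = other decimal digit, 2 = hex letter, 3 = anything else."""
--     if c in "01":
--         return 0
--     if c in "23456789":
--         return 1
--     if c in "abcdef":
--         return 2
--     return 3
--
--
-- def detect_base(value: str) -> str:
--     """
--     Detect whether the given string is hex, binary, or decimal.
--     Returns: 'hex', 'binary', 'decimal', or 'unknown'
--     """
--     value = value.strip().lower()
--     prefix = value[:2]
--     if prefix == "0x":
--         return "hex"
--     if prefix == "0b":
--         return "binary"
--     rank = 0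
--     for c in value:
--         cls = _char_class(c)
--         if cls > rank:
--             rank = cls
--     if rank == 0:
--         return "binary"
--     if rank == 3:
--         return "unknown"
--     try:
--         int(value, 10)
--         return "decimal"
--     except ValueError:
--         return "hex"
-- ===== Notes on version B (the rewrite author's own statement) =====
-- stated objective: alternative
-- what changed: Replaces A's staged all(...) membership scans (binary set, then hex set) by a single pass computing the maximum 4-way character-class rank (0 binary digit / 1 decimal digit / 2 hex letter / 3 other) and branching on that rank, and tests the 0x/0b prefix by comparing the value[:2] slice instead of startswith; the strip/lower and the int(value,10) decimal probe are kept.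
import Mathlib
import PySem

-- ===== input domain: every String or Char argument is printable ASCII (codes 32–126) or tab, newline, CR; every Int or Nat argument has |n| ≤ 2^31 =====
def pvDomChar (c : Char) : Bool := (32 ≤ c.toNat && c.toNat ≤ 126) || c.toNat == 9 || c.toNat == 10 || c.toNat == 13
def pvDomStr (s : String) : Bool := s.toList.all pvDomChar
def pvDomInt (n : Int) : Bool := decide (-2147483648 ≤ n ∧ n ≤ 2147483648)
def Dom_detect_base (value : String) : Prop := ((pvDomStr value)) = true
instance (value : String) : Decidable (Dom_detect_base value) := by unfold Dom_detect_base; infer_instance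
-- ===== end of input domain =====

-- B replaces A's staged all(...) membership scans by a single pass computing the maximum
-- character-class rank (0 binary digit / 1 decimal digit / 2 hex letter / 3 other) and
-- branching on that rank, and tests the 0x/0b prefix by comparing the value[:2] slice;
-- the strip/lower and the int(value, 10) decimal probe are kept (return value only).

-- ===== PORT A =====
def detect_base (value : String) : String :=
  let v := PySem.Str.lower (PySem.Str.strip value)
  if PySem.Str.startswith v "0x" then "hex"
  else if PySem.Str.startswith v "0b" then "binary"
  else if v.toList.all (fun c => ("01".toList).contains c) then "binary"
  else if v.toList.all (fun c => ("0123456789abcdef".toList).contains c) then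
    -- try: int(value, 10) → "decimal"; except ValueError → "hex"
    match PySem.Int.ofStrBase? v 10 with
    | some _ => "decimal"
    | none => "hex"
  else "unknown"

-- ===== PORT B =====
-- helper _char_class of Source B
def charClass (c : Char) : Int :=
  if ("01".toList).contains c then 0
  else if ("23456789".toList).contains c then 1
  else if ("abcdef".toList).contains c then 2
  else 3

def detect_base_alt (value : String) : String :=
  let v := PySem.Str.lower (PySem.Str.strip value)
  let pfx := PySem.List.slice v.toList none (some 2)  -- prefix = value[:2]
  if pfx = "0x".toList then "hex"
  else if pfx = "0b".toList then "binary"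
  else
    let rank : Int := v.toList.foldl (fun r c =>
      let cls := charClass c
      if cls > r then cls else r) 0
    if rank = 0 then "binary"
    else if rank = 3 then "unknown"
    else
      -- try: int(value, 10) → "decimal"; except ValueError → "hex"
      match PySem.Int.ofStrBase? v 10 with
      | some _ => "decimal"
      | none => "hex"

-- ===== PRECONDITION & SPEC =====
def Spec_detect_base (value : String) (out : String) : Prop := out = detect_base_alt value
instance (value : String) (out : String) : Decidable (Spec_detect_base value out) := by unfold Spec_detect_base; infer_instance

-- ===== CLAIM =====
def Claim_equal_detect_base : Prop := ∀ (value : String), Dom_detect_base value → Spec_detect_base value (detect_base value)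

-- ===== LEMMAS AND PROOFS =====

-- the loop step of B, named for the proofs
def rankStep (r : Int) (c : Char) : Int := if charClass c > r then charClass c else r

theorem charClass_nonneg (c : Char) : 0 ≤ charClass c := by
  unfold charClass; split_ifs <;> norm_num

theorem charClass_le_three (c : Char) : charClass c ≤ 3 := by
  unfold charClass; split_ifs <;> norm_num

theorem charClass_zero_iff (c : Char) :
    charClass c = 0 ↔ ("01".toList).contains c = true := by
  unfold charClass; split_ifs with h1 h2 h3
  · exact iff_of_true rfl h1
  · exact iff_of_false (by norm_num) h1
  · exact iff_of_false (by norm_num) h1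
  · exact iff_of_false (by norm_num) h1

-- membership in the hex set is exactly membership in one of the three class sets
theorem hex_cases (c : Char) :
    ("0123456789abcdef".toList).contains c = true ↔
      (("01".toList).contains c = true ∨ ("23456789".toList).contains c = true ∨
        ("abcdef".toList).contains c = true) := by
  rw [show "0123456789abcdef".toList = ['0','1','2','3','4','5','6','7','8','9','a','b','c','d','e','f'] from rfl,
    show "01".toList = ['0','1'] from rfl, show "23456789".toList = ['2','3','4','5','6','7','8','9'] from rfl,
    show "abcdef".toList = ['a','b','c','d','e','f'] from rfl]
  simp only [List.contains_eq_mem, List.mem_cons, List.not_mem_nil, or_false, decide_eq_true_eq]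
  tauto

theorem charClass_le_two_iff (c : Char) :
    charClass c ≤ 2 ↔ ("0123456789abcdef".toList).contains c = true := by
  rw [hex_cases]
  unfold charClass; split_ifs with h1 h2 h3
  · exact iff_of_true (by norm_num) (Or.inl h1)
  · exact iff_of_true (by norm_num) (Or.inr (Or.inl h2))
  · exact iff_of_true (by norm_num) (Or.inr (Or.inr h3))
  · exact iff_of_false (by norm_num) (by tauto)

theorem charClass_three_iff (c : Char) :
    charClass c = 3 ↔ ¬ ("0123456789abcdef".toList).contains c = true := by
  rw [← charClass_le_two_iff]
  constructor
  · intro h; omega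
  · intro h
    have h3 := charClass_le_three c
    unfold charClass at *; split_ifs at * <;> omega

theorem le_foldl_rankStep (cs : List Char) (a : Int) : a ≤ cs.foldl rankStep a := by
  induction cs generalizing a with
  | nil => simp
  | cons x xs ih =>
    simp only [List.foldl_cons]
    refine le_trans ?_ (ih (rankStep a x))
    unfold rankStep; split_ifs with h <;> omega

theorem foldl_rankStep_le (cs : List Char) (a b : Int) (ha : a ≤ b)
    (h : ∀ c ∈ cs, charClass c ≤ b) : cs.foldl rankStep a ≤ b := by
  induction cs generalizing a with
  | nil => simpa
  | cons x xs ih =>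
    simp only [List.foldl_cons]
    refine ih (rankStep a x) ?_ (fun c hc => h c (List.mem_cons_of_mem _ hc))
    have hx := h x (List.mem_cons_self ..)
    unfold rankStep; split_ifs with hxr <;> omega

theorem charClass_le_foldl (cs : List Char) (a : Int) (c : Char) (hc : c ∈ cs) :
    charClass c ≤ cs.foldl rankStep a := by
  induction cs generalizing a with
  | nil => cases hc
  | cons x xs ih =>
    simp only [List.foldl_cons]
    rcases List.mem_cons.mp hc with rfl | hc'
    · refine le_trans ?_ (le_foldl_rankStep xs (rankStep a c))
      unfold rankStep; split_ifs with h <;> omega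
    · exact ih (rankStep a x) hc'

theorem rankFold_zero_iff (cs : List Char) :
    cs.foldl rankStep 0 = 0 ↔ (cs.all (fun c => ("01".toList).contains c)) = true := by
  rw [List.all_eq_true]
  constructor
  · intro h c hc
    have h1 := charClass_le_foldl cs 0 c hc
    have h2 := charClass_nonneg c
    rw [← charClass_zero_iff]; omega
  · intro h
    have hle : cs.foldl rankStep 0 ≤ 0 := by
      refine foldl_rankStep_le cs 0 0 le_rfl (fun c hc => ?_)
      rw [(charClass_zero_iff c).2 (h c hc)]
    have hge := le_foldl_rankStep cs 0
    omega

theorem rankFold_three_iff (cs : List Char) :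
    cs.foldl rankStep 0 = 3 ↔
      ¬ (cs.all (fun c => ("0123456789abcdef".toList).contains c)) = true := by
  rw [List.all_eq_true]
  constructor
  · intro h hall
    have hle : cs.foldl rankStep 0 ≤ 2 := by
      refine foldl_rankStep_le cs 0 2 (by norm_num) (fun c hc => ?_)
      exact (charClass_le_two_iff c).2 (hall c hc)
    omega
  · intro h
    push Not at h
    obtain ⟨c, hc, hnotc⟩ := h
    have h3 : charClass c = 3 := (charClass_three_iff c).2 (by simpa using hnotc)
    have hge := charClass_le_foldl cs 0 c hc
    have hle : cs.foldl rankStep 0 ≤ 3 :=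
      foldl_rankStep_le cs 0 3 (by norm_num) (fun d _ => charClass_le_three d)
    omega

-- A tests the prefix with startswith, B by comparing the slice value[:2]
theorem startswith2_iff (cs : List Char) (a b : Char) :
    PySem.Chars.startswith cs [a, b] = true ↔ PySem.List.slice cs none (some 2) = [a, b] := by
  rw [show (2 : Int) = ((2 : Nat) : Int) from rfl, PySem.List.slice_to_natCast]
  simp only [PySem.Chars.startswith, List.isPrefixOf_iff_prefix, List.prefix_iff_eq_take,
    List.length_cons, List.length_nil]
  exact eq_comm

-- the shared body of both ports, with the stripped/lowered string abstracted
theorem bodies_eq (v : String) :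
    (if PySem.Str.startswith v "0x" then "hex"
     else if PySem.Str.startswith v "0b" then "binary"
     else if v.toList.all (fun c => ("01".toList).contains c) then "binary"
     else if v.toList.all (fun c => ("0123456789abcdef".toList).contains c) then
       match PySem.Int.ofStrBase? v 10 with
       | some _ => "decimal"
       | none => "hex"
     else "unknown")
    = (if PySem.List.slice v.toList none (some 2) = "0x".toList then "hex"
       else if PySem.List.slice v.toList none (some 2) = "0b".toList then "binary"
       else
         if v.toList.foldl rankStep 0 = 0 then "binary"
         else if v.toList.foldl rankStep 0 = 3 then "unknown"
         else
           match PySem.Int.ofStrBase? v 10 with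
           | some _ => "decimal"
           | none => "hex") := by
  by_cases h1 : PySem.Str.startswith v "0x"
  · have h1' : PySem.List.slice v.toList none (some 2) = "0x".toList :=
      (startswith2_iff v.toList '0' 'x').1 h1
    rw [if_pos h1, if_pos h1']
  · have h1' : ¬ PySem.List.slice v.toList none (some 2) = "0x".toList :=
      fun h => h1 ((startswith2_iff v.toList '0' 'x').2 h)
    by_cases h2 : PySem.Str.startswith v "0b"
    · have h2' : PySem.List.slice v.toList none (some 2) = "0b".toList :=
        (startswith2_iff v.toList '0' 'b').1 h2
      rw [if_neg h1, if_neg h1', if_pos h2, if_pos h2']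
    · have h2' : ¬ PySem.List.slice v.toList none (some 2) = "0b".toList :=
        fun h => h2 ((startswith2_iff v.toList '0' 'b').2 h)
      rw [if_neg h1, if_neg h1', if_neg h2, if_neg h2']
      by_cases hb : (v.toList.all (fun c => ("01".toList).contains c)) = true
      · have hr0 : v.toList.foldl rankStep 0 = 0 := (rankFold_zero_iff _).2 hb
        rw [if_pos hb, if_pos hr0]
      · have hr0 : ¬ v.toList.foldl rankStep 0 = 0 := fun h => hb ((rankFold_zero_iff _).1 h)
        by_cases hh : (v.toList.all (fun c => ("0123456789abcdef".toList).contains c)) = true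
        · have hr3 : ¬ v.toList.foldl rankStep 0 = 3 := fun h => (rankFold_three_iff _).1 h hh
          rw [if_neg hb, if_pos hh, if_neg hr0, if_neg hr3]
        · have hr3 : v.toList.foldl rankStep 0 = 3 := (rankFold_three_iff _).2 hh
          rw [if_neg hb, if_neg hh, if_neg hr0, if_pos hr3]

-- ===== VERDICT =====
theorem detect_base_spec : Claim_equal_detect_base := by
  intro value _
  exact bodies_eq (PySem.Str.lower (PySem.Str.strip value))
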